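-- pv_equiv track=rewrite | github.com/tamio0800/HappyPie | order_manage/KASH/kashgari_final_with_Alicia.py | get_prod
-- ===== SOURCE A (Python) =====
-- def get_prod(y, y_):
--     prods = []
--     prod = ''
--     for _y, _y_ in zip(y, y_):
--         if _y_ in ['B-PROD', 'I-PROD']:
--             prod +=  _y
--         elif _y_ not in ['B-PROD', 'I-PROD'] and prod != '':
--             prods.append(prod)
--             prod = ''
--     if prod != '':
--         prods.append(prod)
--     return prods
-- ===== SOURCE B (Python) =====
-- def get_prod(y, y_):
--     PROD = ('B-PROD', 'I-PROD')
--     pairs = list(zip(y, y_))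
--     n = len(pairs)
--     res = []
--     i = 0
--     while i < n:
--         if pairs[i][1] in PROD:
--             j = i
--             while j < n and pairs[j][1] in PROD:
--                 j += 1
--             seg = ''.join(c for c, _ in pairs[i:j])
--             if seg:
--                 res.append(seg)
--             i = j
--         else:
--             i += 1
--     return res
-- ===== Notes on version B (the rewrite author's own statement) =====
-- stated objective: alternative
-- what changed: Replaces the accumulator/flush state machine (and its post-loop flush) with a two-pointer scan that finds each maximal PROD-tagged run, joins its tokens in one step, and keeps the segment if nonempty.
import Mathlib
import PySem

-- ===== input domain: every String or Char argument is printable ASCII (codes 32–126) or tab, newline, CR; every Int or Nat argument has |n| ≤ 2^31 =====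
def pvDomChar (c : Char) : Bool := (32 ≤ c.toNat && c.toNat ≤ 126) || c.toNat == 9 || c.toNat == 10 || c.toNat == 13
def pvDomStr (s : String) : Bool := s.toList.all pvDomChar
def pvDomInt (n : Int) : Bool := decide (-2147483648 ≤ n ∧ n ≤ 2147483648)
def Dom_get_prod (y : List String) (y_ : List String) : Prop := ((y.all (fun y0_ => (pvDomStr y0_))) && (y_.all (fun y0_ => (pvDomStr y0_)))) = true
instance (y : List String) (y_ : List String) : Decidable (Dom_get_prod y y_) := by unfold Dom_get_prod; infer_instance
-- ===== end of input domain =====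

-- B replaces A's accumulator/flush state machine with a two-pointer scan over maximal
-- PROD-tagged runs (alternative decomposition, same O(n) cost).

-- ===== PORT A =====
-- literal port of A's loop: state (prods, prod), flush on a non-PROD tag, final flush after the loop
def get_prod_go (pairs : List (String × String)) (prods : List String) (prod : String) : List String :=
  match pairs with
  | [] => if prod == "" then prods else prods ++ [prod]
  | (c, t) :: rest =>
    if t == "B-PROD" || t == "I-PROD" then
      get_prod_go rest prods (prod ++ c)
    else if prod != "" then
      get_prod_go rest (prods ++ [prod]) ""
    else
      get_prod_go rest prods prod

def get_prod (y : List String) (y_ : List String) : List String :=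
  get_prod_go (y.zip y_) [] ""

-- ===== PORT B =====
-- tag test for B ( `pairs[i][1] in PROD` )
def prodTag (p : String × String) : Bool := p.2 == "B-PROD" || p.2 == "I-PROD"

-- B's while loop: at a PROD tag, take the whole maximal PROD run, join it, keep it if nonempty
def get_prod_alt_go (pairs : List (String × String)) : List String :=
  match pairs with
  | [] => []
  | (c, t) :: rest =>
    if prodTag (c, t) then
      let run := ((c, t) :: rest).takeWhile prodTag
      let rest' := ((c, t) :: rest).dropWhile prodTag
      let seg := PySem.Str.join "" (run.map Prod.fst)
      if seg == "" then get_prod_alt_go rest' else seg :: get_prod_alt_go rest'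
    else
      get_prod_alt_go rest
termination_by pairs.length
decreasing_by
  · rename_i hpt _
    simp [hpt]
    exact List.length_dropWhile_le _ _
  · rename_i hpt _
    simp [hpt]
    exact List.length_dropWhile_le _ _
  · simp

def get_prod_alt (y : List String) (y_ : List String) : List String :=
  get_prod_alt_go (y.zip y_)

-- ===== PRECONDITION & SPEC =====
def Spec_get_prod (y : List String) (y_ : List String) (out : List String) : Prop := out = get_prod_alt y y_
instance (y : List String) (y_ : List String) (out : List String) : Decidable (Spec_get_prod y y_ out) := by unfold Spec_get_prod; infer_instance

-- ===== CLAIM (what is proved, stated in full; the proofs are below) =====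
def Claim_equal_get_prod : Prop := ∀ (y : List String) (y_ : List String), Dom_get_prod y y_ → Spec_get_prod y y_ (get_prod y y_)

-- ===== LEMMAS AND PROOFS =====

theorem intercalate_nil_char (l : List (List Char)) : List.intercalate [] l = l.flatten := by
  induction l with
  | nil => simp [List.intercalate]
  | cons h t ih =>
    cases t with
    | nil => simp [List.intercalate]
    | cons h2 t2 =>
      simp only [List.intercalate] at *
      simp [List.intersperse] at *
      simpa using ih

theorem join_empty_cons (c : String) (l : List String) :
    PySem.Str.join "" (c :: l) = c ++ PySem.Str.join "" l := by
  apply String.toList_inj.mp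
  simp [PySem.Str.join, PySem.Chars.join, intercalate_nil_char]

theorem join_empty_nil : PySem.Str.join "" ([] : List String) = "" := by
  apply String.toList_inj.mp
  simp [PySem.Str.join, PySem.Chars.join, List.intercalate]

-- A's loop distributes over the output accumulator
theorem get_prod_go_acc (pairs : List (String × String)) :
    ∀ prods prod, get_prod_go pairs prods prod = prods ++ get_prod_go pairs [] prod := by
  induction pairs with
  | nil => intro prods prod; simp [get_prod_go]; split <;> simp
  | cons p rest ih =>
    intro prods prod
    obtain ⟨c, t⟩ := p
    simp only [get_prod_go]
    split
    · exact ih prods (prod ++ c)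
    · split
      · simp only [List.nil_append]
        rw [ih (prods ++ [prod]) "", ih [prod] ""]
        simp
      · exact ih prods prod

-- B's loop seen one step at a time (its own defining equation, also valid at a non-PROD head)
theorem get_prod_alt_go_eq (pairs : List (String × String)) :
    get_prod_alt_go pairs =
      (let seg := PySem.Str.join "" ((pairs.takeWhile prodTag).map Prod.fst)
       if seg == "" then get_prod_alt_go (pairs.dropWhile prodTag)
       else seg :: get_prod_alt_go (pairs.dropWhile prodTag)) := by
  match pairs with
  | [] => simp [get_prod_alt_go, join_empty_nil]
  | (c, t) :: rest =>
    by_cases h : prodTag (c, t)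
    · rw [get_prod_alt_go]
      simp only [h, if_true]
    · have hf : prodTag (c, t) = false := by simpa using h
      simp [hf, join_empty_nil]

-- the central invariant: A's loop with pending accumulator `prod` against B's run decomposition
theorem get_prod_main (pairs : List (String × String)) :
    ∀ prod, get_prod_go pairs [] prod =
      (let seg := prod ++ PySem.Str.join "" ((pairs.takeWhile prodTag).map Prod.fst)
       if seg == "" then get_prod_alt_go (pairs.dropWhile prodTag)
       else seg :: get_prod_alt_go (pairs.dropWhile prodTag)) := by
  induction pairs with
  | nil =>
    intro prod
    simp [get_prod_go, get_prod_alt_go, join_empty_nil]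
  | cons p rest ih =>
    intro prod
    obtain ⟨c, t⟩ := p
    by_cases h : prodTag (c, t)
    · have ht : (t == "B-PROD" || t == "I-PROD") = true := h
      simp only [get_prod_go, ht, if_true, List.takeWhile_cons, List.dropWhile_cons, h,
        List.map_cons, join_empty_cons]
      rw [ih (prod ++ c), String.append_assoc]
    · have ht : (t == "B-PROD" || t == "I-PROD") = false := by
        simpa [prodTag] using h
      simp only [get_prod_go, ht, Bool.false_eq_true, if_false,
        List.takeWhile_cons, List.dropWhile_cons, h, List.map_nil, join_empty_nil]
      have hf : prodTag (c, t) = false := by simpa using h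
      have hstep : get_prod_alt_go ((c, t) :: rest) = get_prod_alt_go rest := by
        rw [get_prod_alt_go]; simp [hf]
      by_cases hp : prod = ""
      · subst hp
        simp only [bne_self_eq_false, Bool.false_eq_true, if_false]
        rw [ih "", hstep, get_prod_alt_go_eq rest]
        simp
      · have hb : (prod != "") = true := by simpa using hp
        simp only [hb, if_true, List.nil_append]
        rw [get_prod_go_acc, ih "", hstep, get_prod_alt_go_eq rest]
        simp only [String.append_empty, String.empty_append]
        simp [hp]

-- ===== VERDICT (by name: the statement is the Claim_ definition above) =====
theorem get_prod_spec : Claim_equal_get_prod := by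
  intro y y_ _
  unfold Spec_get_prod get_prod get_prod_alt
  rw [get_prod_main (y.zip y_) "", get_prod_alt_go_eq (y.zip y_)]
  simp
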